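-- pv_equiv track=rewrite | github.com/Cerujolean/Academic-Portfolio-UCL | COMP0015-Python: Functions and Tracing/contact.py | find_infection_windows
-- ===== SOURCE A (Python) =====
-- def find_infection_windows(vks):
--    """ Calculate infection windows for the vampires.
--
--    Args:
--       vks (list): a list of dictionaries of vampire knowledge data of
--          each time unit.
--
--    Returns:
--       windows (dict): a dictionary mapping definite vampires to the possible
--          infection window (a pair, start and end).
--
--    """
--    windows = {}
--    vampires_on_last_day = {participant for participant, status \
--       in vks[-1].items() if status == 'V'}
--    for vampire in vampires_on_last_day:
--       start = 0
--       end = None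
--       time = 0
--       for i in vks:
--          if i.get(vampire) == 'H':
--             start = time
--          elif i.get(vampire) == 'V' and end is None:
--             end = time
--          time += 1
--          windows[vampire] = (start, end)
--
--    return windows
-- ===== SOURCE B (Python) =====
-- def find_infection_windows(vks):
--    """One forward sweep over the days, maintaining a table of partial
--    windows for every vampire of the last day, instead of re-scanning
--    all days once per vampire."""
--    targets = {participant for participant, status in vks[-1].items()
--               if status == 'V'}
--    windows = {vampire: (0, None) for vampire in targets}
--    for time, day in enumerate(vks):
--       for participant, status in day.items():
--          if participant in windows:
--             start, end = windows[participant]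
--             if status == 'H':
--                windows[participant] = (time, end)
--             elif status == 'V' and end is None:
--                windows[participant] = (start, time)
--    return windows
-- ===== Notes on version B (the rewrite author's own statement) =====
-- stated objective: alternative
-- what changed: Instead of re-scanning the whole day list once per vampire (nested: vampires x days), B makes a single forward pass over the days, maintaining a dict of partial (start, end) windows for all last-day vampires at once.
import Mathlib
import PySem

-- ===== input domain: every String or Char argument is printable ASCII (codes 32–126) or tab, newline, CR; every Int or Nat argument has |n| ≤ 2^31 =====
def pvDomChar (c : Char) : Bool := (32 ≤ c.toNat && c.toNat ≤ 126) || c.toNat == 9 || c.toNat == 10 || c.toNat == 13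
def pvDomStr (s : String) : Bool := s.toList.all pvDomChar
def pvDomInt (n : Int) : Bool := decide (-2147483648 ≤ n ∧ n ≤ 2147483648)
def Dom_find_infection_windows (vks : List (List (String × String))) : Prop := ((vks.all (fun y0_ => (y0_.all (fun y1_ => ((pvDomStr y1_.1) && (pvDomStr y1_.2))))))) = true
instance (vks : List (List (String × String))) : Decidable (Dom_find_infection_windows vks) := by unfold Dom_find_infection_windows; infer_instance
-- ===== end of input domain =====

-- B replaces A's per-vampire re-scan of all days by one forward sweep over the
-- days that maintains a table of partial windows for all last-day vampires.


-- ===== PORT A =====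
def find_infection_windows (vks : List (List (String × String))) : List (String × Int × Option Int) :=
  match PySem.List.pyGet? vks (-1) with
  | none => []  -- vks[-1] raises IndexError; excluded by Pre_
  | some lastDay =>
    -- {participant for participant, status in vks[-1].items() if status == 'V'}
    let vampires_on_last_day : PySem.Set String :=
      lastDay.foldl (fun s ps => if ps.2 == "V" then PySem.Set.add s ps.1 else s) PySem.Set.empty
    let windows : PySem.Dict String (Int × Option Int) :=
      vampires_on_last_day.foldl (fun windows vampire =>
        (vks.foldl
          (fun (acc : Int × Option Int × Int × PySem.Dict String (Int × Option Int)) i =>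
            let g := (PySem.Dict.mk i).get? vampire
            let se : Int × Option Int :=
              if g == some "H" then (acc.2.2.1, acc.2.1)
              else if g == some "V" && acc.2.1 == none then (acc.1, some acc.2.2.1)
              else (acc.1, acc.2.1)
            (se.1, se.2, acc.2.2.1 + 1, acc.2.2.2.insert vampire (se.1, se.2)))
          (0, none, 0, windows)).2.2.2)
        PySem.Dict.empty
    windows.items

-- ===== PORT B =====
def find_infection_windows_alt (vks : List (List (String × String))) : List (String × Int × Option Int) :=
  match PySem.List.pyGet? vks (-1) with
  | none => []  -- vks[-1] raises IndexError; excluded by Pre_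
  | some lastDay =>
    let targets : PySem.Set String :=
      lastDay.foldl (fun s ps => if ps.2 == "V" then PySem.Set.add s ps.1 else s) PySem.Set.empty
    let windows0 : PySem.Dict String (Int × Option Int) :=
      targets.foldl (fun d v => d.insert v ((0 : Int), (none : Option Int))) PySem.Dict.empty
    let windows : PySem.Dict String (Int × Option Int) :=
      (PySem.List.enumerate vks 0).foldl (fun d td =>
        td.2.foldl (fun d ps =>
          match d.get? ps.1 with
          | none => d  -- participant not in windows
          | some se =>
            if ps.2 == "H" then d.insert ps.1 (td.1, se.2)
            else if ps.2 == "V" && se.2 == none then d.insert ps.1 (se.1, some td.1)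
            else d) d) windows0
    windows.items

-- ===== PRECONDITION & SPEC =====
-- Pre_ excludes the empty list (vks[-1] raises IndexError in both A and B) and day
-- association lists with duplicate keys, which do not encode any Python dict.
def Pre_find_infection_windows (vks : List (List (String × String))) : Prop :=
  vks ≠ [] ∧ ∀ day ∈ vks, (day.map Prod.fst).Nodup
instance (vks : List (List (String × String))) : Decidable (Pre_find_infection_windows vks) := by
  unfold Pre_find_infection_windows; infer_instance
def pvWitness_find_infection_windows : (List (List (String × String))) :=
  [[("alice", "H"), ("bob", "V")], [("alice", "V"), ("bob", "V")]]
def Spec_find_infection_windows (vks : List (List (String × String))) (out : List (String × Int × Option Int)) : Prop := out = find_infection_windows_alt vks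
instance (vks : List (List (String × String))) (out : List (String × Int × Option Int)) : Decidable (Spec_find_infection_windows vks out) := by unfold Spec_find_infection_windows; infer_instance

-- ===== CLAIM (what is proved, stated in full; the proofs are below) =====
def Claim_equal_find_infection_windows : Prop := ∀ (vks : List (List (String × String))), Dom_find_infection_windows vks → Pre_find_infection_windows vks → Spec_find_infection_windows vks (find_infection_windows vks)

-- ===== LEMMAS AND PROOFS =====

-- the pure per-day update of one vampire's window
def pvUpd (t : Int) (g : Option String) (se : Int × Option Int) : Int × Option Int :=
  if g == some "H" then (t, se.2)
  else if g == some "V" && se.2 == none then (se.1, some t)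
  else se

-- one vampire's window after scanning the given days starting at time t
def pvScan (vks : List (List (String × String))) (v : String) (t : Int) (se : Int × Option Int) :
    Int × Option Int :=
  match vks with
  | [] => se
  | d :: rest => pvScan rest v (t + 1) (pvUpd t ((PySem.Dict.mk d).get? v) se)

theorem pv_innerA (vks : List (List (String × String))) (v : String) :
    ∀ (t s : Int) (e : Option Int) (w : PySem.Dict String (Int × Option Int)), vks ≠ [] →
    (vks.foldl
      (fun (acc : Int × Option Int × Int × PySem.Dict String (Int × Option Int)) i =>
        let g := (PySem.Dict.mk i).get? v
        let se : Int × Option Int :=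
          if g == some "H" then (acc.2.2.1, acc.2.1)
          else if g == some "V" && acc.2.1 == none then (acc.1, some acc.2.2.1)
          else (acc.1, acc.2.1)
        (se.1, se.2, acc.2.2.1 + 1, acc.2.2.2.insert v (se.1, se.2)))
      (s, e, t, w)).2.2.2 = w.insert v (pvScan vks v t (s, e)) := by
  induction vks with
  | nil => intro _ _ _ _ h; exact absurd rfl h
  | cons d rest ih =>
    intro t s e w _
    by_cases hrest : rest = []
    · subst hrest; simp [pvScan, pvUpd, List.foldl]
    · rw [List.foldl_cons]
      have hstep : ∀ (acc : Int × Option Int × Int × PySem.Dict String (Int × Option Int)) (hacc : acc = (s, e, t, w)),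
          (let g := (PySem.Dict.mk d).get? v
           let se : Int × Option Int :=
             if g == some "H" then (acc.2.2.1, acc.2.1)
             else if g == some "V" && acc.2.1 == none then (acc.1, some acc.2.2.1)
             else (acc.1, acc.2.1)
           ((se.1, se.2, acc.2.2.1 + 1, acc.2.2.2.insert v (se.1, se.2)) : Int × Option Int × Int × PySem.Dict String (Int × Option Int)))
          = ((pvUpd t ((PySem.Dict.mk d).get? v) (s, e)).1,
             (pvUpd t ((PySem.Dict.mk d).get? v) (s, e)).2, t + 1,
             w.insert v (pvUpd t ((PySem.Dict.mk d).get? v) (s, e))) := by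
        intro acc hacc; subst hacc; simp [pvUpd]
      rw [hstep (s, e, t, w) rfl, ih (t + 1) _ _ _ hrest]
      simp [pvScan, PySem.Dict.insert_insert_self]

-- the target-set fold keeps its accumulator duplicate-free
theorem pv_targets_nodup (l : List (String × String)) :
    ∀ (s : PySem.Set String), s.Nodup →
    (l.foldl (fun s ps => if ps.2 == "V" then PySem.Set.add s ps.1 else s) s).Nodup := by
  induction l with
  | nil => intro s hs; exact hs
  | cons p rest ih =>
    intro s hs
    rw [List.foldl_cons]
    by_cases h : p.2 == "V"
    · simp only [h, if_pos]; exact ih _ (PySem.Set.nodup_add s p.1 hs)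
    · simp only [h]; exact ih _ hs

theorem pvUpd_none (t : Int) (se : Int × Option Int) : pvUpd t none se = se := by
  simp [pvUpd]

-- lookup in a dict whose items are targets.map (fun v => (v, w v))
theorem pv_get_M (targets : List String) (w : String → Int × Option Int) (p : String) :
    (PySem.Dict.mk (targets.map (fun v => (v, w v)))).get? p
      = if p ∈ targets then some (w p) else none := by
  induction targets with
  | nil => simp [PySem.Dict.get?]
  | cons a rest ih =>
    rw [List.map_cons, PySem.Dict.get?_mk_cons, ih]
    by_cases h : a = p
    · subst h; simp
    · simp only [beq_iff_eq, h, if_false, List.mem_cons]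
      have : ¬p = a := fun h' => h h'.symm
      simp [this]

-- overwriting an existing key of such a dict updates the table pointwise
theorem pv_insert_M (targets : List String) (w : String → Int × Option Int) (p : String)
    (hp : p ∈ targets) (x : Int × Option Int) :
    (PySem.Dict.mk (targets.map (fun v => (v, w v)))).insert p x
      = PySem.Dict.mk (targets.map (fun v => (v, if v = p then x else w v))) := by
  have hc : (PySem.Dict.mk (targets.map (fun v => (v, w v)))).contains p = true := by
    rw [PySem.Dict.contains_mk]
    simp only [List.any_map, List.any_eq_true]
    exact ⟨p, hp, by simp⟩
  apply PySem.Dict.ext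
  rw [PySem.Dict.items_insert_of_contains _ _ hc]
  show (targets.map _).map _ = _
  rw [List.map_map]
  refine List.map_congr_left (fun v _ => ?_)
  by_cases h : v = p
  · subst h; simp
  · simp [h]

-- folding one day's items over the table applies pvUpd pointwise
theorem pv_dayfold (targets : List String) (t : Int) (day : List (String × String)) :
    ∀ (w : String → Int × Option Int), (day.map Prod.fst).Nodup →
    (day.foldl (fun d ps =>
        match d.get? ps.1 with
        | none => d
        | some se =>
          if ps.2 == "H" then d.insert ps.1 (t, se.2)
          else if ps.2 == "V" && se.2 == none then d.insert ps.1 (se.1, some t)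
          else d)
      (PySem.Dict.mk (targets.map (fun v => (v, w v)))))
      = PySem.Dict.mk (targets.map (fun v => (v, pvUpd t ((PySem.Dict.mk day).get? v) (w v)))) := by
  induction day with
  | nil =>
    intro w _
    refine congrArg _ (List.map_congr_left (fun v _ => ?_))
    simp [pvUpd, PySem.Dict.get?]
  | cons ps rest ih =>
    intro w hnd
    rw [List.map_cons, List.nodup_cons] at hnd
    obtain ⟨hp_not, hnd⟩ := hnd
    rw [List.foldl_cons]
    by_cases hp : ps.1 ∈ targets
    · -- the item's key is a tracked vampire: the step rewrites its entry
      have hstep : (match (PySem.Dict.mk (targets.map (fun v => (v, w v)))).get? ps.1 with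
          | none => PySem.Dict.mk (targets.map (fun v => (v, w v)))
          | some se =>
            if ps.2 == "H" then (PySem.Dict.mk (targets.map (fun v => (v, w v)))).insert ps.1 (t, se.2)
            else if ps.2 == "V" && se.2 == none then (PySem.Dict.mk (targets.map (fun v => (v, w v)))).insert ps.1 (se.1, some t)
            else PySem.Dict.mk (targets.map (fun v => (v, w v))))
          = PySem.Dict.mk (targets.map (fun v => (v, if v = ps.1 then pvUpd t (some ps.2) (w v) else w v))) := by
        rw [pv_get_M, if_pos hp]
        by_cases hH : (ps.2 == "H") = true
        · simp only [hH, if_true]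
          rw [pv_insert_M _ _ _ hp]
          refine congrArg _ (List.map_congr_left (fun v _ => ?_))
          by_cases h : v = ps.1
          · subst h; simp [pvUpd, hH]
          · simp [h]
        · by_cases hV : (ps.2 == "V" && (w ps.1).2 == none) = true
          · simp only [Bool.not_eq_true] at hH
            simp only [hH, Bool.false_eq_true, if_false, hV, if_true]
            rw [pv_insert_M _ _ _ hp]
            refine congrArg _ (List.map_congr_left (fun v _ => ?_))
            by_cases h : v = ps.1
            · subst h
              obtain ⟨h1, h2⟩ := (Bool.and_eq_true ..).mp hV
              simp [pvUpd, hH, h1, h2]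
            · simp [h]
          · simp only [Bool.not_eq_true] at hH hV
            simp only [hH, hV, Bool.false_eq_true, if_false]
            refine congrArg _ (List.map_congr_left (fun v _ => ?_))
            by_cases h : v = ps.1
            · subst h
              simp [pvUpd, hH]
              intro h1 h2
              rw [h1, h2] at hV
              simp at hV
            · simp [h]
      rw [hstep, ih _ hnd]
      refine congrArg _ (List.map_congr_left (fun v _ => ?_))
      by_cases h : v = ps.1
      · have hnone : (PySem.Dict.mk rest).get? v = none := by
          rw [PySem.Dict.get?_eq_none_iff_not_mem_keys]
          intro hmem
          exact (h ▸ hp_not) (by simpa using hmem)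
        rw [hnone, pvUpd_none, PySem.Dict.get?_mk_cons]
        have hbeq : (ps.1 == v) = true := by simp [h]
        rw [hbeq, if_pos rfl, if_pos h]
      · rw [PySem.Dict.get?_mk_cons]
        have hbeq : (ps.1 == v) = false := by simp [Ne.symm h]
        rw [hbeq]
        simp [h]
    · -- untracked participant: the step is a no-op
      have hstep : (match (PySem.Dict.mk (targets.map (fun v => (v, w v)))).get? ps.1 with
          | none => PySem.Dict.mk (targets.map (fun v => (v, w v)))
          | some se =>
            if ps.2 == "H" then (PySem.Dict.mk (targets.map (fun v => (v, w v)))).insert ps.1 (t, se.2)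
            else if ps.2 == "V" && se.2 == none then (PySem.Dict.mk (targets.map (fun v => (v, w v)))).insert ps.1 (se.1, some t)
            else PySem.Dict.mk (targets.map (fun v => (v, w v))))
          = PySem.Dict.mk (targets.map (fun v => (v, w v))) := by
        rw [pv_get_M, if_neg hp]
      rw [hstep, ih _ hnd]
      refine congrArg _ (List.map_congr_left (fun v hv => ?_))
      have hne : (ps.1 == v) = false := by
        simp only [beq_eq_false_iff_ne, ne_eq]
        exact fun hvv => hp (hvv ▸ hv)
      rw [PySem.Dict.get?_mk_cons]
      simp [hne]

-- B's sweep over the enumerated days computes pvScan for every tracked vampire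
theorem pv_enumfold (targets : List String) (vks : List (List (String × String))) :
    ∀ (t : Int) (w : String → Int × Option Int), (∀ day ∈ vks, (day.map Prod.fst).Nodup) →
    ((PySem.List.enumerate vks t).foldl (fun d td =>
        td.2.foldl (fun d ps =>
          match d.get? ps.1 with
          | none => d
          | some se =>
            if ps.2 == "H" then d.insert ps.1 (td.1, se.2)
            else if ps.2 == "V" && se.2 == none then d.insert ps.1 (se.1, some td.1)
            else d) d)
      (PySem.Dict.mk (targets.map (fun v => (v, w v)))))
      = PySem.Dict.mk (targets.map (fun v => (v, pvScan vks v t (w v)))) := by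
  induction vks with
  | nil => intro t w _; simp [PySem.List.enumerate_nil, pvScan]
  | cons day rest ih =>
    intro t w hnd
    rw [PySem.List.enumerate_cons, List.foldl_cons]
    have hday : (day.map Prod.fst).Nodup := hnd day (List.mem_cons_self ..)
    show (PySem.List.enumerate rest (t + 1)).foldl _
        (day.foldl _ (PySem.Dict.mk (targets.map (fun v => (v, w v))))) = _
    rw [pv_dayfold targets t day w hday,
        ih (t + 1) _ (fun d hd => hnd d (List.mem_cons_of_mem _ hd))]
    exact congrArg _ (List.map_congr_left (fun v _ => by rw [pvScan]))

-- ===== VERDICT (by name: the statement is the Claim_ definition above) =====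
theorem find_infection_windows_spec : Claim_equal_find_infection_windows := by
  intro vks _ hpre
  obtain ⟨hne, hnodup⟩ := hpre
  unfold Spec_find_infection_windows find_infection_windows find_infection_windows_alt
  cases hlast : PySem.List.pyGet? vks (-1) with
  | none => rfl
  | some lastDay =>
    simp only
    have hnd_targets : (lastDay.foldl
        (fun s ps => if ps.2 == "V" then PySem.Set.add s ps.1 else s) PySem.Set.empty).Nodup :=
      pv_targets_nodup lastDay _ List.nodup_nil
    set targets := lastDay.foldl
        (fun s ps => if ps.2 == "V" then PySem.Set.add s ps.1 else s) PySem.Set.empty with htargets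
    -- A's outer loop: each iteration just writes one vampire's full scan
    have hA : (targets.foldl (fun windows vampire =>
        (vks.foldl
          (fun (acc : Int × Option Int × Int × PySem.Dict String (Int × Option Int)) i =>
            let g := (PySem.Dict.mk i).get? vampire
            let se : Int × Option Int :=
              if g == some "H" then (acc.2.2.1, acc.2.1)
              else if g == some "V" && acc.2.1 == none then (acc.1, some acc.2.2.1)
              else (acc.1, acc.2.1)
            (se.1, se.2, acc.2.2.1 + 1, acc.2.2.2.insert vampire (se.1, se.2)))
          (0, none, 0, windows)).2.2.2)
        PySem.Dict.empty).items
        = targets.map (fun v => (v, pvScan vks v 0 (0, none))) := by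
      rw [PySem.List.foldl_congr_mem targets _
        (fun w v => w.insert v (pvScan vks v 0 (0, none))) PySem.Dict.empty
        (fun w v _ => pv_innerA vks v 0 0 none w hne)]
      show (List.foldl (fun (w : PySem.Dict String (Int × Option Int)) v =>
          w.insert (id v) (pvScan vks v 0 (0, none))) PySem.Dict.empty targets).items = _
      rw [PySem.Dict.items_foldl_insert_fresh targets id (fun v => pvScan vks v 0 (0, none))
        PySem.Dict.empty (fun a _ => PySem.Dict.contains_empty a) (by simpa using hnd_targets)]
      simp [PySem.Dict.empty]
    -- B's initial table
    have hB0 : (targets.foldl (fun d v => d.insert v ((0 : Int), (none : Option Int)))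
        PySem.Dict.empty)
        = PySem.Dict.mk (targets.map (fun v => (v, ((0 : Int), (none : Option Int))))) := by
      apply PySem.Dict.ext
      show (List.foldl (fun (d : PySem.Dict String (Int × Option Int)) v =>
          d.insert (id v) ((0 : Int), (none : Option Int))) PySem.Dict.empty targets).items = _
      rw [PySem.Dict.items_foldl_insert_fresh targets id
        (fun _ => ((0 : Int), (none : Option Int))) PySem.Dict.empty
        (fun a _ => PySem.Dict.contains_empty a) (by simpa using hnd_targets)]
      simp [PySem.Dict.empty]
    rw [hA, hB0, pv_enumfold targets vks 0 (fun _ => ((0 : Int), (none : Option Int))) hnodup]
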